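-- pv_equiv track=rewrite | github.com/pypi-data/pypi-mirror-302 | packages/bcsl-python/bcsl_python-0.6.0-py3-none-any.whl/bcsl/bcsl.py | find_asymmetric_edges_mb
-- ===== SOURCE A (Python) =====
-- from typing import List, Set, Tuple, Dict, Optional, Union
--
-- def find_asymmetric_edges_mb(
--     markov_blankets: List[Set[int]],
-- ) -> Tuple[List[Tuple[int, int]], List[Tuple[int, int]]]:
--     """
--     Identify asymmetric edges in the markov_blanket.
--     :param markov_blankets: List[Set[int]], the learned Markov Blankets for each variable.
--     :return: Tuple[List[Tuple[int, int]], List[Tuple[int, int]]], asymmetric and symmetric edges.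
--     """
--     asymmetric_edges = []
--     symmetric_edges = []
--     n_vars = len(markov_blankets)
--     for i in range(n_vars):
--         for j in range(i + 1, n_vars):
--             if (i in markov_blankets[j]) and (j not in markov_blankets[i]):
--                 asymmetric_edges.append((i, j))
--             elif (j in markov_blankets[i]) and (i not in markov_blankets[j]):
--                 asymmetric_edges.append((i, j))
--             elif (i in markov_blankets[j]) and (j in markov_blankets[i]):
--                 symmetric_edge = (i, j) if i < j else (j, i)
--                 if symmetric_edge not in asymmetric_edges:
--                     symmetric_edges.append(symmetric_edge)
--     return asymmetric_edges, symmetric_edges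
-- ===== SOURCE B (Python) =====
-- def find_asymmetric_edges_mb(markov_blankets):
--     """Collect candidate pairs from blanket memberships, dedupe, sort, classify with O(1) set lookups."""
--     n = len(markov_blankets)
--     candidates = set()
--     for j, mb in enumerate(markov_blankets):
--         for v in mb:
--             if 0 <= v < n and v != j:
--                 candidates.add((v, j) if v < j else (j, v))
--     asymmetric_edges = []
--     symmetric_edges = []
--     for a, b in sorted(candidates):
--         if (a in markov_blankets[b]) and (b in markov_blankets[a]):
--             symmetric_edges.append((a, b))
--         else:
--             asymmetric_edges.append((a, b))
--     return asymmetric_edges, symmetric_edges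
-- ===== Notes on version B (the rewrite author's own statement) =====
-- stated objective: faster
-- what changed: Instead of testing every pair (i,j) with two set lookups in an O(n^2) double loop, B walks the blanket lists once to collect the candidate pairs that have at least one membership, dedupes them in a set, sorts them lexicographically and classifies each by two O(1) lookups.
import Mathlib
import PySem

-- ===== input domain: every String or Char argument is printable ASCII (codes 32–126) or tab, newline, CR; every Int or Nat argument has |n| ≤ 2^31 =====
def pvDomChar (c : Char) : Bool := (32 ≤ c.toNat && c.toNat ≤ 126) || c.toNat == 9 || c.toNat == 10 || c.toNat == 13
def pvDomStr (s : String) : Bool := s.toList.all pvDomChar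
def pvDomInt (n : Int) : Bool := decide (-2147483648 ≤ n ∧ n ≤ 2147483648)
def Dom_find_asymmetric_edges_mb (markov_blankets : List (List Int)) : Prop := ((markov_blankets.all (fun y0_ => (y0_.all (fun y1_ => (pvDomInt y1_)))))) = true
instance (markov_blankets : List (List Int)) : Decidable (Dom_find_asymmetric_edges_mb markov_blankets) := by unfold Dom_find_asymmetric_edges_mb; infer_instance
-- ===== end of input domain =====

-- B replaces A's all-pairs double loop by collecting candidate pairs from the blanket lists
-- themselves, deduplicating them in a set, sorting lexicographically and classifying each
-- candidate with two membership lookups (objective: faster).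

-- ===== PORT A =====
-- `markov_blankets[k]`: every index either program uses lies in range (A's loop indices come
-- from range(n); B's candidate components are proved to satisfy 0 ≤ a < b < n below), so the
-- `.getD []` default is dead code.
def pvBlanket (markov_blankets : List (List Int)) (k : Int) : List Int :=
  (PySem.List.pyGet? markov_blankets k).getD []

def find_asymmetric_edges_mb (markov_blankets : List (List Int)) : (List (Int × Int)) × (List (Int × Int)) :=
  let n : Int := markov_blankets.length
  (PySem.List.pyRange 0 n).foldl (fun st i =>
    (PySem.List.pyRange (i + 1) n).foldl (fun st j =>
      if (pvBlanket markov_blankets j).contains i && !(pvBlanket markov_blankets i).contains j then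
        (st.1 ++ [(i, j)], st.2)
      else if (pvBlanket markov_blankets i).contains j && !(pvBlanket markov_blankets j).contains i then
        (st.1 ++ [(i, j)], st.2)
      else if (pvBlanket markov_blankets j).contains i && (pvBlanket markov_blankets i).contains j then
        if !st.1.contains (if i < j then (i, j) else (j, i)) then
          (st.1, st.2 ++ [if i < j then (i, j) else (j, i)])
        else st
      else st) st) ([], [])

-- ===== PORT B =====
def find_asymmetric_edges_mb_alt (markov_blankets : List (List Int)) : (List (Int × Int)) × (List (Int × Int)) :=
  let n : Int := markov_blankets.length
  let candidates : PySem.Set (Int × Int) :=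
    (PySem.List.enumerate markov_blankets).foldl (fun s jm =>
      jm.2.foldl (fun s v =>
        if 0 ≤ v ∧ v < n ∧ v ≠ jm.1 then
          PySem.Set.add s (if v < jm.1 then (v, jm.1) else (jm.1, v))
        else s) s) PySem.Set.empty
  (PySem.List.sorted2 candidates (fun p => p.1) (fun p => p.2)).foldl (fun st p =>
    if (pvBlanket markov_blankets p.2).contains p.1 && (pvBlanket markov_blankets p.1).contains p.2 then
      (st.1, st.2 ++ [p])
    else (st.1 ++ [p], st.2)) ([], [])

-- ===== PRECONDITION & SPEC =====
def Spec_find_asymmetric_edges_mb (markov_blankets : List (List Int)) (out : (List (Int × Int)) × (List (Int × Int))) : Prop := out = find_asymmetric_edges_mb_alt markov_blankets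
instance (markov_blankets : List (List Int)) (out : (List (Int × Int)) × (List (Int × Int))) : Decidable (Spec_find_asymmetric_edges_mb markov_blankets out) := by unfold Spec_find_asymmetric_edges_mb; infer_instance

-- ===== CLAIM (what is proved, stated in full; the proofs are below) =====
def Claim_equal_find_asymmetric_edges_mb : Prop := ∀ (markov_blankets : List (List Int)), Dom_find_asymmetric_edges_mb markov_blankets → Spec_find_asymmetric_edges_mb markov_blankets (find_asymmetric_edges_mb markov_blankets)

-- ===== LEMMAS AND PROOFS =====

-- the two membership tests for a pair p = (i, j): i in markov_blankets[j], j in markov_blankets[i]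
def pvC1 (mbs : List (List Int)) (p : Int × Int) : Bool := (pvBlanket mbs p.2).contains p.1
def pvC2 (mbs : List (List Int)) (p : Int × Int) : Bool := (pvBlanket mbs p.1).contains p.2

-- all pairs (i, j) with 0 ≤ i < j < n, in lexicographic order (A's traversal order)
def pvL (n : Int) : List (Int × Int) :=
  (PySem.List.pyRange 0 n).flatMap (fun i => (PySem.List.pyRange (i + 1) n).map (fun j => (i, j)))

-- Python's tuple comparison as a lexicographic sort key
def pvKey (p : Int × Int) : Lex (Int × Int) := toLex (p.1, p.2)

lemma pvL_mem (n : Int) (p : Int × Int) : p ∈ pvL n ↔ 0 ≤ p.1 ∧ p.1 < p.2 ∧ p.2 < n := by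
  obtain ⟨i, j⟩ := p
  simp [pvL, List.mem_flatMap, PySem.List.mem_pyRange_one]
  omega

lemma pvL_pairwise (n : Int) : (pvL n).Pairwise (fun a b => pvKey a < pvKey b) := by
  unfold pvL
  rw [List.pairwise_flatMap]
  constructor
  · intro a _
    rw [List.pairwise_map]
    refine (PySem.List.pairwise_lt_pyRange_one _ _).imp ?_
    intro x y h
    simp [pvKey, Prod.Lex.toLex_lt_toLex, h]
  · refine (PySem.List.pairwise_lt_pyRange_one _ _).imp ?_
    intro a b h x hx y hy
    simp only [List.mem_map] at hx hy
    obtain ⟨xj, _, rfl⟩ := hx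
    obtain ⟨yj, _, rfl⟩ := hy
    simp [pvKey, Prod.Lex.toLex_lt_toLex, h]

lemma pvL_nodup (n : Int) : (pvL n).Nodup :=
  (pvL_pairwise n).imp (fun h => ne_of_apply_ne pvKey (ne_of_lt h))

lemma pvBlanket_eq (mbs : List (List Int)) (k : Nat) (hk : k < mbs.length) :
    pvBlanket mbs (k : Int) = mbs[k] := by
  simp [pvBlanket, hk]

-- B's classification loop is a pair of complementary filters.
lemma pvB_fold (mbs : List (List Int)) (l : List (Int × Int)) (st : (List (Int × Int)) × (List (Int × Int))) :
    l.foldl (fun st p =>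
      if (pvBlanket mbs p.2).contains p.1 && (pvBlanket mbs p.1).contains p.2 then
        (st.1, st.2 ++ [p])
      else (st.1 ++ [p], st.2)) st
    = (st.1 ++ l.filter (fun p => !(pvC1 mbs p && pvC2 mbs p)),
       st.2 ++ l.filter (fun p => pvC1 mbs p && pvC2 mbs p)) := by
  induction l generalizing st with
  | nil => simp
  | cons p t ih =>
    simp only [List.foldl_cons, List.filter_cons]
    rw [ih]
    by_cases h1 : p.1 ∈ pvBlanket mbs p.2 <;>
      by_cases h2 : p.2 ∈ pvBlanket mbs p.1 <;>
      simp [pvC1, pvC2, h1, h2]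

-- A's loop body over a duplicate-free list of strictly increasing pairs that are not yet in
-- the asymmetric accumulator (then the `not in asymmetric_edges` test never fires) is a pair
-- of filters as well.
lemma pvA_fold (mbs : List (List Int)) (l : List (Int × Int)) (st : (List (Int × Int)) × (List (Int × Int)))
    (hlt : ∀ p ∈ l, p.1 < p.2) (hnd : l.Nodup) (hst : ∀ p ∈ l, p ∉ st.1) :
    l.foldl (fun st p =>
      if (pvBlanket mbs p.2).contains p.1 && !(pvBlanket mbs p.1).contains p.2 then
        (st.1 ++ [p], st.2)
      else if (pvBlanket mbs p.1).contains p.2 && !(pvBlanket mbs p.2).contains p.1 then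
        (st.1 ++ [p], st.2)
      else if (pvBlanket mbs p.2).contains p.1 && (pvBlanket mbs p.1).contains p.2 then
        if !st.1.contains (if p.1 < p.2 then p else (p.2, p.1)) then
          (st.1, st.2 ++ [if p.1 < p.2 then p else (p.2, p.1)])
        else st
      else st) st
    = (st.1 ++ l.filter (fun p => (pvC1 mbs p && !pvC2 mbs p) || (pvC2 mbs p && !pvC1 mbs p)),
       st.2 ++ l.filter (fun p => pvC1 mbs p && pvC2 mbs p)) := by
  induction l generalizing st with
  | nil => simp
  | cons p t ih =>
    have hplt : p.1 < p.2 := hlt p (List.mem_cons_self ..)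
    have hnd' := (List.nodup_cons.mp hnd).2
    have hpt : p ∉ t := (List.nodup_cons.mp hnd).1
    have htl : ∀ q ∈ t, q.1 < q.2 := fun q hq => hlt q (List.mem_cons_of_mem _ hq)
    have hstt : ∀ q ∈ t, q ∉ st.1 ++ [p] := fun q hq => by
      simp only [List.mem_append, List.mem_singleton, not_or]
      exact ⟨hst q (List.mem_cons_of_mem _ hq), by rintro rfl; exact hpt hq⟩
    have hst' : ∀ q ∈ t, q ∉ st.1 := fun q hq => hst q (List.mem_cons_of_mem _ hq)
    simp only [List.foldl_cons, List.filter_cons]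
    by_cases h1 : p.1 ∈ pvBlanket mbs p.2
    · by_cases h2 : p.2 ∈ pvBlanket mbs p.1
      · rw [if_neg (by simp [h1, h2]), if_neg (by simp [h1, h2]), if_pos (by simp [h1, h2])]
        simp only [if_pos hplt]
        rw [if_pos (show (!st.1.contains p) = true by simpa using hst p (List.mem_cons_self ..)),
            ih (st.1, st.2 ++ [p]) htl hnd' hst']
        simp [pvC1, pvC2, h1, h2]
      · rw [if_pos (by simp [h1, h2]), ih (st.1 ++ [p], st.2) htl hnd' hstt]
        simp [pvC1, pvC2, h1, h2]
    · by_cases h2 : p.2 ∈ pvBlanket mbs p.1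
      · rw [if_neg (by simp [h1]), if_pos (by simp [h1, h2]), ih (st.1 ++ [p], st.2) htl hnd' hstt]
        simp [pvC1, pvC2, h1, h2]
      · rw [if_neg (by simp [h1]), if_neg (by simp [h2]), if_neg (by simp [h1]),
            ih (st.1, st.2) htl hnd' hst']
        simp [pvC1, pvC2, h1, h2]

lemma pvNodup_foldl_add {β : Type} (g : β → Int × Int) :
    ∀ (l : List β) (s : PySem.Set (Int × Int)), s.Nodup →
      (l.foldl (fun s v => PySem.Set.add s (g v)) s).Nodup := by
  intro l
  induction l with
  | nil => exact fun s h => h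
  | cons v t ih => exact fun s h => ih _ (PySem.Set.nodup_add _ _ h)

lemma pvMem_foldl {α β : Type} (f : List α → β → List α) (Q : β → Prop) (p : α)
    (hf : ∀ s x, p ∈ f s x ↔ p ∈ s ∨ Q x) :
    ∀ (l : List β) (s : List α), p ∈ l.foldl f s ↔ p ∈ s ∨ ∃ x ∈ l, Q x := by
  intro l
  induction l with
  | nil => simp
  | cons x t ih =>
    intro s
    rw [List.foldl_cons, ih, hf]
    simp only [List.mem_cons]
    constructor
    · rintro ((h | h) | ⟨y, hy, hQ⟩)
      · exact Or.inl h
      · exact Or.inr ⟨x, Or.inl rfl, h⟩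
      · exact Or.inr ⟨y, Or.inr hy, hQ⟩
    · rintro (h | ⟨y, (rfl | hy), hQ⟩)
      · exact Or.inl (Or.inl h)
      · exact Or.inl (Or.inr hQ)
      · exact Or.inr ⟨y, hy, hQ⟩

lemma pvCands_nodup (mbs : List (List Int)) :
    ((PySem.List.enumerate mbs).foldl (fun s jm =>
      jm.2.foldl (fun s v =>
        if 0 ≤ v ∧ v < (mbs.length : Int) ∧ v ≠ jm.1 then
          PySem.Set.add s (if v < jm.1 then (v, jm.1) else (jm.1, v))
        else s) s) (PySem.Set.empty : PySem.Set (Int × Int))).Nodup := by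
  have step : ∀ (s : PySem.Set (Int × Int)) (jm : Int × List Int), s.Nodup →
      (jm.2.foldl (fun s v =>
        if 0 ≤ v ∧ v < (mbs.length : Int) ∧ v ≠ jm.1 then
          PySem.Set.add s (if v < jm.1 then (v, jm.1) else (jm.1, v))
        else s) s).Nodup := by
    intro s jm hs
    rw [PySem.List.foldl_ite_eq_foldl_filter]
    exact pvNodup_foldl_add _ _ _ hs
  have main : ∀ (E : List (Int × List Int)) (s : PySem.Set (Int × Int)), s.Nodup →
      (E.foldl (fun s jm =>
        jm.2.foldl (fun s v =>
          if 0 ≤ v ∧ v < (mbs.length : Int) ∧ v ≠ jm.1 then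
            PySem.Set.add s (if v < jm.1 then (v, jm.1) else (jm.1, v))
          else s) s) s).Nodup := by
    intro E
    induction E with
    | nil => exact fun s h => h
    | cons jm t ih => exact fun s h => ih _ (step _ _ h)
  exact main _ _ List.nodup_nil

lemma pvCands_mem (mbs : List (List Int)) (p : Int × Int) :
    p ∈ ((PySem.List.enumerate mbs).foldl (fun s jm =>
      jm.2.foldl (fun s v =>
        if 0 ≤ v ∧ v < (mbs.length : Int) ∧ v ≠ jm.1 then
          PySem.Set.add s (if v < jm.1 then (v, jm.1) else (jm.1, v))
        else s) s) (PySem.Set.empty : PySem.Set (Int × Int)))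
    ↔ (p ∈ pvL (mbs.length : Int) ∧ (pvC1 mbs p || pvC2 mbs p)) := by
  rw [pvMem_foldl _
    (fun jm => ∃ v ∈ jm.2, (0 ≤ v ∧ v < (mbs.length : Int) ∧ v ≠ jm.1) ∧
      p = (if v < jm.1 then (v, jm.1) else (jm.1, v))) p
    (fun s jm => by
      rw [PySem.List.foldl_ite_eq_foldl_filter, PySem.Set.mem_foldl_add]
      simp only [List.mem_filter, decide_eq_true_eq]
      tauto)]
  simp only [PySem.Set.empty, List.not_mem_nil, false_or, PySem.List.mem_enumerate_iff]
  constructor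
  · rintro ⟨jm, ⟨k, hk, rfl⟩, v, hv, ⟨h0, hn, hne⟩, rfl⟩
    simp only [zero_add] at *
    have hb := pvBlanket_eq mbs k hk
    by_cases hlt : v < (k : Int)
    · rw [if_pos hlt]
      refine ⟨(pvL_mem _ _).mpr ⟨by simpa using h0, by simpa using hlt,
        by show (k : Int) < (mbs.length : Int); exact_mod_cast hk⟩, ?_⟩
      simp [pvC1, hb, hv]
    · rw [if_neg hlt]
      refine ⟨(pvL_mem _ _).mpr ⟨by positivity, by omega, hn⟩, ?_⟩
      simp [pvC2, hb, hv]
  · rintro ⟨hp, hc⟩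
    rw [pvL_mem] at hp
    obtain ⟨h0, h12, h2n⟩ := hp
    rcases Bool.or_eq_true_iff.mp hc with hc1 | hc2
    · have hk : p.2.toNat < mbs.length := by omega
      have hb := pvBlanket_eq mbs p.2.toNat hk
      have h2 : ((p.2.toNat : Nat) : Int) = p.2 := by omega
      refine ⟨(p.2, mbs[p.2.toNat]), ⟨p.2.toNat, hk, by rw [zero_add, h2]⟩, p.1, ?_,
        ⟨h0, by omega, by omega⟩, ?_⟩
      · have hm : p.1 ∈ pvBlanket mbs p.2 := by simpa [pvC1] using hc1
        rwa [← h2, hb] at hm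
      · rw [if_pos h12]
    · have hk : p.1.toNat < mbs.length := by omega
      have hb := pvBlanket_eq mbs p.1.toNat hk
      have h1 : ((p.1.toNat : Nat) : Int) = p.1 := by omega
      refine ⟨(p.1, mbs[p.1.toNat]), ⟨p.1.toNat, hk, by rw [zero_add, h1]⟩, p.2, ?_,
        ⟨by omega, by omega, by omega⟩, ?_⟩
      · have hm : p.2 ∈ pvBlanket mbs p.1 := by simpa [pvC2] using hc2
        rwa [← h1, hb] at hm
      · rw [if_neg (by omega)]

-- Python's sort of int pairs is the sort by the lexicographic key pvKey
lemma pvSorted2_eq_sorted_lex (xs : List (Int × Int)) :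
    PySem.List.sorted2 xs (fun p => p.1) (fun p => p.2) = PySem.List.sorted xs pvKey := by
  rw [PySem.List.sorted_eq_foldl_insertBy]
  unfold PySem.List.sorted2
  simp only [Bool.false_eq_true, if_false]
  congr 1
  funext acc x
  congr 1
  funext a b
  have hk : (pvKey a < pvKey b) ↔ (a.1 < b.1 ∨ a.1 = b.1 ∧ a.2 < b.2) := by
    simp [pvKey, Prod.Lex.toLex_lt_toLex]
  rcases lt_trichotomy a.1 b.1 with h | h | h <;>
    simp [hk, h] <;> omega

-- sorting B's candidate set yields exactly A's traversal order restricted to candidate pairs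
lemma pvSorted_cands (mbs : List (List Int)) :
    PySem.List.sorted2 ((PySem.List.enumerate mbs).foldl (fun s jm =>
      jm.2.foldl (fun s v =>
        if 0 ≤ v ∧ v < (mbs.length : Int) ∧ v ≠ jm.1 then
          PySem.Set.add s (if v < jm.1 then (v, jm.1) else (jm.1, v))
        else s) s) (PySem.Set.empty : PySem.Set (Int × Int))) (fun p => p.1) (fun p => p.2)
    = (pvL (mbs.length : Int)).filter (fun p => pvC1 mbs p || pvC2 mbs p) := by
  rw [pvSorted2_eq_sorted_lex]
  apply PySem.List.sorted_eq_of_perm_of_pairwise_lt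
  · rw [List.perm_ext_iff_of_nodup (List.Nodup.filter _ (pvL_nodup _)) (pvCands_nodup mbs)]
    intro p
    rw [List.mem_filter, pvCands_mem]
  · exact (pvL_pairwise _).sublist (List.filter_sublist)

-- ===== VERDICT (by name: the statement is the Claim_ definition above) =====
theorem find_asymmetric_edges_mb_spec : Claim_equal_find_asymmetric_edges_mb := by
  unfold Claim_equal_find_asymmetric_edges_mb
  intro mbs _
  unfold Spec_find_asymmetric_edges_mb
  unfold find_asymmetric_edges_mb find_asymmetric_edges_mb_alt
  simp only []
  rw [pvSorted_cands, pvB_fold]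
  have hA := pvA_fold mbs (pvL (mbs.length : Int)) ([], [])
    (fun p hp => ((pvL_mem _ _).mp hp).2.1) (pvL_nodup _) (fun p _ => List.not_mem_nil)
  rw [pvL, List.foldl_flatMap] at hA
  simp only [List.foldl_map] at hA
  rw [hA]
  simp only [List.nil_append, List.filter_filter, pvL]
  refine Prod.ext ?_ ?_ <;>
  · apply List.filter_congr
    intro p _
    cases h1 : pvC1 mbs p <;> cases h2 : pvC2 mbs p <;> rfl
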